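-- pv_equiv track=rewrite | github.com/miney-py/miney | miney/lua.py | _read_until_unescaped
-- ===== SOURCE A (Python) =====
-- def _read_until_unescaped(text: str, start: int, end_char: str) -> tuple[str, int]:
--     """
--     Read from 'start' until the next unescaped 'end_char'.
--     Returns (substring, index_of_end_char).
--     """
--     i = start
--     buf: list[str] = []
--     while i < len(text):
--         ch = text[i]
--         if ch == end_char:
--             bs = 0
--             j = i - 1
--             while j >= 0 and text[j] == '\\':
--                 bs += 1
--                 j -= 1
--             if bs % 2 == 0:
--                 return "".join(buf), i
--         buf.append(ch)
--         i += 1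
--     return "".join(buf), i
-- ===== SOURCE B (Python) =====
-- def _read_until_unescaped(text: str, start: int, end_char: str) -> tuple[str, int]:
--     """
--     Read from 'start' until the next unescaped 'end_char'.
--     Returns (substring, index_of_end_char).
--     Different decomposition: slice the suffix once, then scan it with a running
--     escape-parity BOOLEAN (toggled by backslashes) instead of A's backward
--     rescan of consecutive backslashes at every end_char candidate.
--     """
--     suffix = text[start:]
--     even = True  # even number of consecutive backslashes just before the cursor
--     j = min(start, len(text)) - 1
--     while j >= 0 and text[j] == '\\':
--         even = not even
--         j -= 1
--     for k, ch in enumerate(suffix):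
--         if ch == end_char and even:
--             return suffix[:k], start + k
--         even = True if ch != '\\' else not even
--     return suffix, max(start, len(text))
-- ===== Notes on version B (the rewrite author's own statement) =====
-- stated objective: faster
-- what changed: Replaces A's backward rescan of consecutive backslashes at every end_char candidate (and its character-buffer join) with one slice of the suffix plus a forward scan of that suffix carrying a running escape-parity boolean.
-- outside the precondition, e.g. on _read_until_unescaped('ab', -1, 'x'): A returns ('bab', 2), B returns ('b', 2)
import Mathlib
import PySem

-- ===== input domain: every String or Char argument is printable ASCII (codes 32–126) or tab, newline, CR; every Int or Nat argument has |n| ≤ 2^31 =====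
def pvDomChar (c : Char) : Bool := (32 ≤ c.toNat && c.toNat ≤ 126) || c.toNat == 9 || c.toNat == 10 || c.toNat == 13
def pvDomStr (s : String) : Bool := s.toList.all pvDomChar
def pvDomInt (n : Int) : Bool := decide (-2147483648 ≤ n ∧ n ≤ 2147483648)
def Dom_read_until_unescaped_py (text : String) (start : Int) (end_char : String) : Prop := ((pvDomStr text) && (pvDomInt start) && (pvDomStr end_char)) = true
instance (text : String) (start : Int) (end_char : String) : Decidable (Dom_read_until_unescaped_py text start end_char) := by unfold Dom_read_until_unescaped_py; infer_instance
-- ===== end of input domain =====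

-- B slices the suffix once and scans it forward with a running escape-parity boolean,
-- instead of A's backward backslash rescan at every end_char candidate (objective: faster).

-- ===== PORT A =====

-- inner while loop of A: count consecutive '\\' at positions j, j-1, … (stopping below 0)
def pvBsA (cs : List Char) (j : Int) : Int :=
  if h : 0 ≤ j ∧ PySem.List.pyGet? cs j = some '\\' then pvBsA cs (j - 1) + 1 else 0
termination_by (j + 1).toNat
decreasing_by omega

-- main while loop of A: buf accumulates the characters read so far
def pvLoopA (cs ec : List Char) (i : Int) (buf : List Char) : String × Int :=
  if hlt : i < (cs.length : Int) then
    match PySem.List.pyGet? cs i with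
    | some ch =>
        if [ch] = ec ∧ PySem.Int.mod (pvBsA cs (i - 1)) 2 = 0 then (String.ofList buf, i)
        else pvLoopA cs ec (i + 1) (buf ++ [ch])
    | none => (String.ofList buf, i)   -- IndexError (negative start below -len); outside Pre_
  else (String.ofList buf, i)
termination_by ((cs.length : Int) - i).toNat
decreasing_by omega

def read_until_unescaped_py (text : String) (start : Int) (end_char : String) : String × Int :=
  pvLoopA text.toList end_char.toList start []

-- ===== PORT B =====

-- B's carry-in parity: true iff an even number of consecutive '\\' sits just before position j+1
def pvEvenB (cs : List Char) (j : Int) : Bool :=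
  if h : 0 ≤ j ∧ PySem.List.pyGet? cs j = some '\\' then !pvEvenB cs (j - 1) else true
termination_by (j + 1).toNat
decreasing_by omega

-- B's for-loop over the suffix: offset of the first unescaped end_char, if any
def pvScanB (ec : List Char) : List Char → Bool → Nat → Option Nat
  | [], _, _ => none
  | ch :: rest, even, k =>
      if [ch] = ec ∧ even = true then some k
      else pvScanB ec rest (if ch ≠ '\\' then true else !even) (k + 1)

def read_until_unescaped_py_alt (text : String) (start : Int) (end_char : String) : String × Int :=
  let cs := text.toList
  let suffix := PySem.List.slice cs (some start) none
  match pvScanB end_char.toList suffix (pvEvenB cs (min start (cs.length : Int) - 1)) 0 with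
  | some k => (String.ofList (PySem.List.slice suffix none (some (k : Int))), start + (k : Int))
  | none => (String.ofList suffix, max start (cs.length : Int))

-- ===== PRECONDITION & SPEC =====
-- Pre_ excludes negative start, which is outside this internal parser helper's natural domain:
-- A raises IndexError for start < -len(text) and reads via Python negative-index wraparound
-- for -len ≤ start < 0; B slices from start directly.
def Pre_read_until_unescaped_py (text : String) (start : Int) (end_char : String) : Prop :=
  0 ≤ start
instance (text : String) (start : Int) (end_char : String) : Decidable (Pre_read_until_unescaped_py text start end_char) := by unfold Pre_read_until_unescaped_py; infer_instance

def pvWitness_read_until_unescaped_py : String × Int × String := ("a\\\"b\"c", 0, "\"")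

def Spec_read_until_unescaped_py (text : String) (start : Int) (end_char : String) (out : String × Int) : Prop := out = read_until_unescaped_py_alt text start end_char
instance (text : String) (start : Int) (end_char : String) (out : String × Int) : Decidable (Spec_read_until_unescaped_py text start end_char out) := by unfold Spec_read_until_unescaped_py; infer_instance

-- ===== CLAIM (what is proved, stated in full; the proofs are below) =====
def Claim_equal_read_until_unescaped_py : Prop := ∀ (text : String) (start : Int) (end_char : String), Dom_read_until_unescaped_py text start end_char → Pre_read_until_unescaped_py text start end_char → Spec_read_until_unescaped_py text start end_char (read_until_unescaped_py text start end_char)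

-- ===== LEMMAS AND PROOFS =====

-- pvEvenB is the parity of A's backward backslash count
theorem pvEven_parity (cs : List Char) : ∀ j : Int,
    (pvEvenB cs j = true ↔ PySem.Int.mod (pvBsA cs j) 2 = 0) := by
  intro j
  induction' hI : (j + 1).toNat using Nat.strong_induction_on with fuel ih generalizing j
  rw [pvEvenB, pvBsA]
  split_ifs with hc
  · have h := ih (j - 1 + 1).toNat (by omega) (j - 1) rfl
    rw [PySem.Int.mod_eq_emod_of_pos (by omega)] at h ⊢
    cases he : pvEvenB cs (j - 1) <;> simp [he] at h ⊢ <;> omega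
  · rw [PySem.Int.mod_eq_emod_of_pos (by omega)]
    simp

-- pvScanB never returns an offset below its accumulator
theorem pvScanB_ge (ec : List Char) : ∀ l (even : Bool) (k0 k : Nat),
    pvScanB ec l even k0 = some k → k0 ≤ k := by
  intro l
  induction l with
  | nil => intro even k0 k h; simp [pvScanB] at h
  | cons ch rest ih =>
      intro even k0 k h
      by_cases hc : [ch] = ec ∧ even = true
      · simp [pvScanB, hc] at h; omega
      · rw [pvScanB, if_neg hc] at h
        exact le_trans (by omega) (ih _ _ _ h)

-- core bridge: A's loop at position i equals B's scan of the remaining suffix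
theorem pvLoop_eq (cs ec : List Char) :
    ∀ i : Int, 0 ≤ i → ∀ (buf : List Char) (even : Bool) (k0 : Nat),
      (i < (cs.length : Int) → (even = true ↔ PySem.Int.mod (pvBsA cs (i - 1)) 2 = 0)) →
      pvLoopA cs ec i buf =
        match pvScanB ec (cs.drop i.toNat) even k0 with
        | some k => (String.ofList (buf ++ (cs.drop i.toNat).take (k - k0)), i + ((k : Int) - (k0 : Int)))
        | none => (String.ofList (buf ++ cs.drop i.toNat), max i (cs.length : Int)) := by
  intro i
  induction' hI : ((cs.length : Int) - i).toNat using Nat.strong_induction_on with fuel ih generalizing i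
  intro h0 buf even k0 heven
  rw [pvLoopA]
  by_cases hlt : i < (cs.length : Int)
  · simp only [hlt, dite_true]
    have hidx : i.toNat < cs.length := by omega
    have hget : PySem.List.pyGet? cs i = some cs[i.toNat] := by
      rw [PySem.List.pyGet?_of_nonneg cs h0, List.getElem?_eq_getElem hidx]
    rw [hget]
    simp only
    have hdrop : cs.drop i.toNat = cs[i.toNat] :: cs.drop (i.toNat + 1) :=
      List.drop_eq_getElem_cons hidx
    rw [hdrop, pvScanB]
    have hpar := heven hlt
    by_cases hc : [cs[i.toNat]] = ec ∧ PySem.Int.mod (pvBsA cs (i - 1)) 2 = 0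
    · have hc' : [cs[i.toNat]] = ec ∧ even = true := ⟨hc.1, hpar.mpr hc.2⟩
      simp only [hc, hc', and_self, if_true]
      simp
    · have hc' : ¬ ([cs[i.toNat]] = ec ∧ even = true) := by
        intro hh; exact hc ⟨hh.1, hpar.mp hh.2⟩
      rw [if_neg hc, if_neg hc']
      have hdrop1 : cs.drop (i.toNat + 1) = cs.drop (i + 1).toNat := by
        congr 1; omega
      rw [hdrop1]
      rw [ih (((cs.length : Int) - (i + 1)).toNat) (by omega) (i + 1) rfl (by omega)
        (buf ++ [cs[i.toNat]]) (if cs[i.toNat] ≠ '\\' then true else !even) (k0 + 1) ?hp]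
      case hp =>
        intro _
        have hbsi : i + 1 - 1 = i := by omega
        rw [hbsi]
        conv_rhs => rw [pvBsA]
        by_cases hbsl : cs[i.toNat] = '\\'
        · rw [dif_pos ⟨h0, by rw [hget, hbsl]⟩, if_neg (by simp [hbsl])]
          rw [PySem.Int.mod_eq_emod_of_pos (by omega)] at hpar ⊢
          cases he : even <;> simp [he] at hpar ⊢ <;> omega
        · rw [dif_neg, if_pos hbsl]
          · rw [PySem.Int.mod_eq_emod_of_pos (by omega)]
            simp
          · rintro ⟨-, hh⟩
            rw [hget] at hh
            exact hbsl (Option.some_inj.mp hh)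
      cases hscan : pvScanB ec (cs.drop (i + 1).toNat) (if cs[i.toNat] ≠ '\\' then true else !even) (k0 + 1) with
      | some k =>
          have hk : k0 + 1 ≤ k := pvScanB_ge ec _ _ _ _ hscan
          simp only [Prod.mk.injEq]
          constructor
          · congr 1
            rw [show k - k0 = (k - (k0 + 1)) + 1 by omega, List.take_succ_cons,
              List.append_assoc]
            rfl
          · push_cast; omega
      | none =>
          simp only [Prod.mk.injEq]
          constructor
          · rw [List.append_assoc]; rfl
          · omega
  · simp only [hlt, dite_false]
    have hnil : cs.drop i.toNat = [] := List.drop_eq_nil_of_le (by omega)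
    rw [hnil, pvScanB]
    simp only [List.append_nil, Prod.mk.injEq]
    exact ⟨trivial, by omega⟩

-- ===== VERDICT (by name: the statement is the Claim_ definition above) =====
theorem read_until_unescaped_py_spec : Claim_equal_read_until_unescaped_py := by
  intro text start end_char _ hpre
  unfold Spec_read_until_unescaped_py read_until_unescaped_py read_until_unescaped_py_alt
  have h0 : (0:Int) ≤ start := hpre
  simp only [PySem.List.slice_from _ h0]
  rw [pvLoop_eq text.toList end_char.toList start h0 []
    (pvEvenB text.toList (min start (text.toList.length : Int) - 1)) 0 ?hp]
  case hp =>
    intro hlt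
    rw [show min start (text.toList.length : Int) - 1 = start - 1 by omega]
    exact pvEven_parity text.toList (start - 1)
  cases hscan : pvScanB end_char.toList (text.toList.drop start.toNat)
      (pvEvenB text.toList (min start (text.toList.length : Int) - 1)) 0 with
  | some k =>
      simp only [Prod.mk.injEq]
      rw [PySem.List.slice_to _ (by omega : (0:Int) ≤ (k:Int))]
      constructor
      · simp
      · push_cast; omega
  | none => simp
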